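-- pv_equiv track=rewrite | github.com/dwest77a/elastic_scrapers | arsf/scraper_code/combine_jsons.py | makeCleanPcode
-- ===== SOURCE A (Python) =====
-- def twodp(x, first=False):
--     if len(str(x)) < 2:
--         x = '0' + str(x)
--     elif len(str(x)) > 2:
--         if first:
--             x = x[:2]
--         else:
--             x = x[2:4]
--     else:
--         pass
--     return str(x)
--
-- def makeCleanPcode(pcode_raw):
--     pcode0 = pcode_raw.split('/')[0]
--     pcode1 = pcode_raw.split('/')[1]
--
--     pcode1a = ''
--     # extract first numbers from pcode1
--     is_num = False
--     is_end_num = False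
--     for char in pcode1:
--         try:
--             num    = int(char)
--             is_num = True
--         except:
--             if is_num:
--                 is_end_num = True
--             is_num = False
--         if is_num and not is_end_num:
--             pcode1a += str(char)
--
--     pcode1b = twodp(pcode1a, first=True)
--
--     pcode = pcode0 + '/' + pcode1b
--     return pcode
-- ===== SOURCE B (Python) =====
-- def _digit_run(s):
--     # first maximal run of decimal digits in s ('' if none)
--     i = 0
--     while i < len(s) and not s[i].isdecimal():
--         i += 1
--     j = i
--     while j < len(s) and s[j].isdecimal():
--         j += 1
--     return s[i:j]
--
-- def makeCleanPcode(pcode_raw):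
--     parts = pcode_raw.split('/')
--     pcode0 = parts[0]
--     pcode1 = parts[1]
--     run = _digit_run(pcode1)
--     pcode1b = run[:2] if len(run) >= 2 else '0' + run
--     return pcode0 + '/' + pcode1b
-- ===== Notes on version B (the rewrite author's own statement) =====
-- stated objective: simpler
-- what changed: Replaces the try/except state-machine scan with two flags and the twodp helper by a plain two-phase scan (skip non-digits, then take digits) and a one-line conditional for the 2-character padding/truncation.
import Mathlib
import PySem

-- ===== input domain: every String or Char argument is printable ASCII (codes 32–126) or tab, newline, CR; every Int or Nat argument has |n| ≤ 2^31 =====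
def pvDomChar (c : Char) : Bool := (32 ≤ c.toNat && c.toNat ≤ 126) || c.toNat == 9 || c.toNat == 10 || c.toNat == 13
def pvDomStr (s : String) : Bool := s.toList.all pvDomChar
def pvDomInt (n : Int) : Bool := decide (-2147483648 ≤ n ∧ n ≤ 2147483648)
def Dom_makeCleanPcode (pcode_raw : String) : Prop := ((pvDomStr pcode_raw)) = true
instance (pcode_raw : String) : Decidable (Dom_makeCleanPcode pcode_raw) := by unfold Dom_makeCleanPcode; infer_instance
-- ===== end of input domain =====

-- B replaces A's try/except flag loop and twodp helper by a skip-digits/take-digits scan and a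
-- one-line padding conditional (objective: simpler). Return value only; neither mutates its argument.

-- ===== PORT A =====
-- twodp(x, first): only called with a string here, so str(x) = x
def twodp (x : String) (first : Bool) : String :=
  if PySem.Str.len x < 2 then "0" ++ x
  else if PySem.Str.len x > 2 then
    if first then PySem.Str.slice x none (some 2)
    else PySem.Str.slice x (some 2) (some 4)
  else x

-- one step of A's for-loop; state = (pcode1a, is_num, is_end_num).
-- 'try: int(char)' succeeds exactly on decimal digits '0'-'9' on the ASCII domain (Char.isDigit).
def pvStepA (s : List Char × Bool × Bool) (c : Char) : List Char × Bool × Bool :=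
  let (acc, is_num, is_end_num) := s
  let (is_num', is_end_num') :=
    if c.isDigit then (true, is_end_num)
    else (false, if is_num then true else is_end_num)
  if is_num' && !is_end_num' then (acc ++ [c], is_num', is_end_num')
  else (acc, is_num', is_end_num')

def makeCleanPcode (pcode_raw : String) : String :=
  let parts := (PySem.Str.split? pcode_raw "/").getD []
  let pcode0 := PySem.List.pyGetD parts 0 ""   -- parts[0] (always in range)
  let pcode1 := PySem.List.pyGetD parts 1 ""   -- parts[1]: IndexError when no '/' — excluded by Pre_
  let st := pcode1.toList.foldl pvStepA ([], false, false)
  let pcode1a := String.ofList st.1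
  let pcode1b := twodp pcode1a true
  pcode0 ++ "/" ++ pcode1b

-- ===== PORT B =====
-- the first while loop of _digit_run: advance past non-digits
def pvSkip : List Char → List Char
  | [] => []
  | c :: cs => if c.isDigit then c :: cs else pvSkip cs

-- the second while loop of _digit_run: collect the digit run
def pvTake : List Char → List Char
  | [] => []
  | c :: cs => if c.isDigit then c :: pvTake cs else []

def makeCleanPcode_alt (pcode_raw : String) : String :=
  let parts := (PySem.Str.split? pcode_raw "/").getD []
  let pcode0 := PySem.List.pyGetD parts 0 ""
  let pcode1 := PySem.List.pyGetD parts 1 ""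
  let run := pvTake (pvSkip pcode1.toList)
  let pcode1b := if run.length ≥ 2 then String.ofList (run.take 2) else "0" ++ String.ofList run
  pcode0 ++ "/" ++ pcode1b

-- ===== PRECONDITION & SPEC =====
-- A indexes split('/')[1]: it raises IndexError iff pcode_raw contains no '/', i.e. the split has fewer than 2 pieces.
def Pre_makeCleanPcode (pcode_raw : String) : Prop :=
  1 < ((PySem.Str.split? pcode_raw "/").getD []).length
instance (pcode_raw : String) : Decidable (Pre_makeCleanPcode pcode_raw) := by
  unfold Pre_makeCleanPcode; infer_instance

def pvWitness_makeCleanPcode : String := "ab/c12d34"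

def Spec_makeCleanPcode (pcode_raw : String) (out : String) : Prop := out = makeCleanPcode_alt pcode_raw
instance (pcode_raw : String) (out : String) : Decidable (Spec_makeCleanPcode pcode_raw out) := by unfold Spec_makeCleanPcode; infer_instance

-- ===== CLAIM (what is proved, stated in full; the proofs are below) =====
def Claim_equal_makeCleanPcode : Prop := ∀ (pcode_raw : String), Dom_makeCleanPcode pcode_raw → Pre_makeCleanPcode pcode_raw → Spec_makeCleanPcode pcode_raw (makeCleanPcode pcode_raw)

-- ===== LEMMAS AND PROOFS =====

-- once is_end_num is true, A's loop never appends again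
lemma foldA_end (l : List Char) (acc : List Char) (n : Bool) :
    (l.foldl pvStepA (acc, n, true)).1 = acc := by
  induction l generalizing n with
  | nil => rfl
  | cons c cs ih =>
      simp only [List.foldl, pvStepA]
      by_cases h : c.isDigit <;> simp [h, ih]

-- inside a digit run, A's loop collects exactly pvTake
lemma foldA_in (l : List Char) (acc : List Char) :
    (l.foldl pvStepA (acc, true, false)).1 = acc ++ pvTake l := by
  induction l generalizing acc with
  | nil => simp [pvTake]
  | cons c cs ih =>
      by_cases h : c.isDigit
      · simp [List.foldl, pvStepA, h, pvTake, ih]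
      · simp [List.foldl, pvStepA, h, pvTake, foldA_end]

-- before any digit, A's loop collects pvTake (pvSkip l)
lemma foldA_skip (l : List Char) (acc : List Char) :
    (l.foldl pvStepA (acc, false, false)).1 = acc ++ pvTake (pvSkip l) := by
  induction l generalizing acc with
  | nil => simp [pvSkip, pvTake]
  | cons c cs ih =>
      by_cases h : c.isDigit
      · simp [List.foldl, pvStepA, h, pvSkip, pvTake, foldA_in]
      · simp [List.foldl, pvStepA, h, pvSkip, ih]

-- twodp on a string with first=True equals B's padding conditional
lemma twodp_eq_pad (run : List Char) :
    twodp (String.ofList run) true =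
      (if run.length ≥ 2 then String.ofList (run.take 2) else "0" ++ String.ofList run) := by
  unfold twodp
  have hs : PySem.Str.slice (String.ofList run) none (some 2) = String.ofList (run.take 2) := by
    simp [PySem.Str.slice, PySem.List.slice_to]
  have hlen : PySem.Str.len (String.ofList run) = (run.length : Int) := by simp
  rw [hlen, hs]
  by_cases h2 : run.length ≥ 2
  · by_cases h3 : (run.length : Int) > 2
    · simp [h2, h3, show ¬((run.length : Int) < 2) by omega]
    · have ht : run.take 2 = run := List.take_of_length_le (by omega)
      simp [h2, h3, ht, show ¬((run.length : Int) < 2) by omega]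
  · simp [h2, show (run.length : Int) < 2 by omega]

-- ===== VERDICT (by name: the statement is the Claim_ definition above) =====
theorem makeCleanPcode_spec : Claim_equal_makeCleanPcode := by
  intro s _hd _hp
  unfold Spec_makeCleanPcode makeCleanPcode makeCleanPcode_alt
  simp only [foldA_skip, List.nil_append, twodp_eq_pad]
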